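-- pv_equiv track=rewrite | github.com/noelotpyrc/trading_cex_data_processing | feature_engineering/current_bar_features.py | _rename_for_lag
-- ===== SOURCE A (Python) =====
-- def _rename_for_lag(base_name: str, lag_k: int) -> str:
--     """Rename a current-bar feature base name to its lag-k counterpart.
--
--     - If the name encodes an interaction with `_x_`, apply lag renaming to both sides.
--     - If the token `_current_` or suffix `_current` is present, convert to `_lag_k_` or `_lag_k`.
--     - Otherwise append `_lag_k` to the base name.
--     """
--     if "_x_" in base_name:
--         left, right = base_name.split("_x_", 1)
--         return f"{_rename_for_lag(left, lag_k)}_x_{_rename_for_lag(right, lag_k)}"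
--     if "_current_" in base_name:
--         return base_name.replace("_current_", f"_lag_{lag_k}_")
--     if base_name.endswith("_current"):
--         return base_name[: -len("_current")] + f"_lag_{lag_k}"
--     return f"{base_name}_lag_{lag_k}"
-- ===== SOURCE B (Python) =====
-- def _rename_for_lag(base_name: str, lag_k: int) -> str:
--     """Rename a current-bar feature base name to its lag-k counterpart.
--
--     Non-recursive: split on every '_x_' once, transform each segment, rejoin.
--     """
--     lag = f"_lag_{lag_k}"
--
--     def _segment(s: str) -> str:
--         if "_current_" in s:
--             return s.replace("_current_", lag + "_")
--         if s.endswith("_current"):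
--             return s[: -len("_current")] + lag
--         return s + lag
--
--     return "_x_".join(_segment(p) for p in base_name.split("_x_"))
-- ===== Notes on version B (the rewrite author's own statement) =====
-- stated objective: simpler
-- what changed: Replaces A's recursion on the first '_x_' occurrence by a single flat split on every '_x_', a map of the per-segment renaming over the parts, and one '_x_'.join.
import Mathlib
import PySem

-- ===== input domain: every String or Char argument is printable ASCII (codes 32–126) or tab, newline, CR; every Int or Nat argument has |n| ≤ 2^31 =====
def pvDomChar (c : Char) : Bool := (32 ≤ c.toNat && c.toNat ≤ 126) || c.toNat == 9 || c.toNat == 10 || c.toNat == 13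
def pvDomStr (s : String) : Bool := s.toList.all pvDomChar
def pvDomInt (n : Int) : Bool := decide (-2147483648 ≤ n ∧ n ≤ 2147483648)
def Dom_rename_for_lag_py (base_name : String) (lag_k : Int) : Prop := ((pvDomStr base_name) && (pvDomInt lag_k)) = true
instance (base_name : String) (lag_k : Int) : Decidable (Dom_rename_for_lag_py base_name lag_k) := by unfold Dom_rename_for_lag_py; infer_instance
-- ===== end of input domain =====

-- B replaces A's recursion on the first '_x_' by one flat split on every '_x_', a map of the
-- per-segment renaming, and a join (objective: simpler, non-recursive; same exact results).

-- ===== PORT A =====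
-- A recurses on both halves of the first '_x_'; fuel = length + 1 always suffices
-- (each recursive call is on a strictly shorter string), so the fuel-0 branch is unreachable.
def renameAGo (lag_k : Int) : Nat → String → String
  | 0, base_name => base_name
  | fuel + 1, base_name =>
    if PySem.Str.isIn "_x_" base_name then
      match PySem.Str.splitMax? base_name "_x_" 1 with
      | some [left, right] =>
          renameAGo lag_k fuel left ++ "_x_" ++ renameAGo lag_k fuel right
      | _ => base_name  -- unreachable: split on present nonempty sep with maxsplit 1 gives 2 parts
    else if PySem.Str.isIn "_current_" base_name then
      PySem.Str.replace base_name "_current_" ("_lag_" ++ PySem.Int.toStr lag_k ++ "_")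
    else if PySem.Str.endswith base_name "_current" then
      PySem.Str.slice base_name none (some (-8)) ++ ("_lag_" ++ PySem.Int.toStr lag_k)
    else
      base_name ++ ("_lag_" ++ PySem.Int.toStr lag_k)

def rename_for_lag_py (base_name : String) (lag_k : Int) : String :=
  renameAGo lag_k (base_name.toList.length + 1) base_name

-- ===== PORT B =====
def segB (lag_k : Int) (s : String) : String :=
  let lag := "_lag_" ++ PySem.Int.toStr lag_k
  if PySem.Str.isIn "_current_" s then
    PySem.Str.replace s "_current_" (lag ++ "_")
  else if PySem.Str.endswith s "_current" then
    PySem.Str.slice s none (some (-8)) ++ lag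
  else
    s ++ lag

def rename_for_lag_py_alt (base_name : String) (lag_k : Int) : String :=
  match PySem.Str.split? base_name "_x_" with
  | some parts => PySem.Str.join "_x_" (parts.map (segB lag_k))
  | none => base_name  -- unreachable: the separator "_x_" is nonempty

-- ===== PRECONDITION & SPEC =====
def Spec_rename_for_lag_py (base_name : String) (lag_k : Int) (out : String) : Prop := out = rename_for_lag_py_alt base_name lag_k
instance (base_name : String) (lag_k : Int) (out : String) : Decidable (Spec_rename_for_lag_py base_name lag_k out) := by unfold Spec_rename_for_lag_py; infer_instance

-- ===== CLAIM (what is proved, stated in full; the proofs are below) =====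
def Claim_equal_rename_for_lag_py : Prop := ∀ (base_name : String) (lag_k : Int), Dom_rename_for_lag_py base_name lag_k → Spec_rename_for_lag_py base_name lag_k (rename_for_lag_py base_name lag_k)

-- ===== LEMMAS AND PROOFS =====

def pvSEP : List Char := ['_', 'x', '_']

-- clean (accumulator-free) specification of str.split("_x_")
def pvSpA : List Char → List (List Char)
  | [] => [[]]
  | c :: rest =>
    if pvSEP.isPrefixOf (c :: rest) then
      [] :: pvSpA (List.drop 3 (c :: rest))
    else
      match pvSpA rest with
      | [] => [[c]]
      | p :: ps => (c :: p) :: ps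
termination_by l => l.length
decreasing_by all_goals simp

-- clean specification of str.split("_x_", 1)
def pvSpA1 : List Char → List (List Char)
  | [] => [[]]
  | c :: rest =>
    if pvSEP.isPrefixOf (c :: rest) then
      [[], List.drop 3 (c :: rest)]
    else
      match pvSpA1 rest with
      | [] => [[c]]
      | p :: ps => (c :: p) :: ps

theorem pvSpA_ne_nil (l : List Char) : pvSpA l ≠ [] := by
  cases l with
  | nil => simp [pvSpA]
  | cons c rest =>
    rw [pvSpA]
    split
    · simp
    · rcases h : pvSpA rest with _ | ⟨p, ps⟩ <;> simp

theorem pv_str_ext {a b : String} (h : a.toList = b.toList) : a = b := by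
  have := congrArg String.ofList h
  simpa using this

theorem pvJoin_singleton (sep p : String) : PySem.Str.join sep [p] = p := by
  apply pv_str_ext
  simp [PySem.Str.toList_join, PySem.Chars.join_singleton]

theorem pvJoin_cons_cons (sep p q : String) (rest : List String) :
    PySem.Str.join sep (p :: q :: rest) = p ++ sep ++ PySem.Str.join sep (q :: rest) := by
  apply pv_str_ext
  simp [PySem.Str.toList_join, PySem.Chars.join_cons_cons]

theorem pvSplitOn_go_eq (fuel : Nat) :
    ∀ (l cur : List Char) (acc : List (List Char)) (p : List Char) (ps : List (List Char)),
      l.length < fuel → pvSpA l = p :: ps →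
      PySem.Chars.splitOn.go pvSEP fuel l cur acc = acc.reverse ++ (cur.reverse ++ p) :: ps := by
  induction fuel with
  | zero => intro l cur acc p ps h; omega
  | succ n ih =>
    intro l cur acc p ps hlen hsp
    cases l with
    | nil =>
      rw [pvSpA] at hsp
      obtain ⟨rfl, rfl⟩ : p = [] ∧ ps = [] := by simpa using hsp.symm
      rw [PySem.Chars.splitOn.go]
      simp
      omega
    | cons c rest =>
      rw [pvSpA] at hsp
      rw [PySem.Chars.splitOn.go]
      by_cases hpre : pvSEP.isPrefixOf (c :: rest) = true
      · rw [if_pos hpre] at hsp ⊢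
        rcases hq : pvSpA (List.drop 3 (c :: rest)) with _ | ⟨q, qs⟩
        · exact absurd hq (pvSpA_ne_nil _)
        · rw [hq] at hsp
          obtain ⟨rfl, rfl⟩ : p = [] ∧ ps = q :: qs := by simpa using hsp.symm
          have hlt : (List.drop 3 (c :: rest)).length < n := by
            simp only [List.length_drop, List.length_cons]
            simp only [List.length_cons] at hlen
            omega
          have : pvSEP.length = 3 := rfl
          rw [this, ih _ _ _ _ _ hlt hq]
          simp
      · rw [if_neg hpre] at hsp ⊢
        rcases hq : pvSpA rest with _ | ⟨q, qs⟩
        · exact absurd hq (pvSpA_ne_nil _)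
        · rw [hq] at hsp
          obtain ⟨rfl, rfl⟩ : p = c :: q ∧ ps = qs := by simpa using hsp.symm
          have hlt : rest.length < n := by
            simp only [List.length_cons] at hlen; omega
          rw [ih _ _ _ _ _ hlt hq]
          simp

theorem pvSplitOnMax_go_zero (fuel : Nat) (l cur : List Char) (acc : List (List Char)) :
    PySem.Chars.splitOnMax.go pvSEP fuel 0 l cur acc = ((cur.reverse ++ l) :: acc).reverse := by
  cases fuel with
  | zero => rw [PySem.Chars.splitOnMax.go]
  | succ n =>
    cases l with
    | nil => rw [PySem.Chars.splitOnMax.go]; simp; omega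
    | cons c rest => rw [PySem.Chars.splitOnMax.go]; simp

theorem pvSplitOnMax_go_eq (fuel : Nat) :
    ∀ (l cur : List Char) (acc : List (List Char)) (p : List Char) (ps : List (List Char)),
      l.length < fuel → pvSpA1 l = p :: ps →
      PySem.Chars.splitOnMax.go pvSEP fuel 1 l cur acc = acc.reverse ++ (cur.reverse ++ p) :: ps := by
  induction fuel with
  | zero => intro l cur acc p ps h; omega
  | succ n ih =>
    intro l cur acc p ps hlen hsp
    cases l with
    | nil =>
      rw [pvSpA1] at hsp
      obtain ⟨rfl, rfl⟩ : p = [] ∧ ps = [] := by simpa using hsp.symm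
      rw [PySem.Chars.splitOnMax.go]
      simp
      omega
    | cons c rest =>
      rw [pvSpA1] at hsp
      rw [PySem.Chars.splitOnMax.go]
      simp only [if_neg (by omega : ¬ (1:Nat) = 0)]
      by_cases hpre : pvSEP.isPrefixOf (c :: rest) = true
      · rw [if_pos hpre] at hsp ⊢
        obtain ⟨rfl, rfl⟩ : p = [] ∧ ps = [List.drop 3 (c :: rest)] := by simpa using hsp.symm
        have : pvSEP.length = 3 := rfl
        rw [this]
        rw [show (1:Nat) - 1 = 0 from rfl, pvSplitOnMax_go_zero]
        simp
      · rw [if_neg hpre] at hsp ⊢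
        rcases hq : pvSpA1 rest with _ | ⟨q, qs⟩
        · cases rest with
          | nil => simp [pvSpA1] at hq
          | cons d t =>
            rw [pvSpA1] at hq
            revert hq; split
            · simp
            · rcases h2 : pvSpA1 t with _ | ⟨r, rs⟩ <;> simp
        · rw [hq] at hsp
          obtain ⟨rfl, rfl⟩ : p = c :: q ∧ ps = qs := by simpa using hsp.symm
          have hlt : rest.length < n := by
            simp only [List.length_cons] at hlen; omega
          rw [ih _ _ _ _ _ hlt hq]
          simp

theorem pvSplitOn_eq (l : List Char) : PySem.Chars.splitOn l pvSEP = pvSpA l := by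
  rcases h : pvSpA l with _ | ⟨p, ps⟩
  · exact absurd h (pvSpA_ne_nil _)
  · unfold PySem.Chars.splitOn
    rw [pvSplitOn_go_eq (l.length + 1) l [] [] p ps (by omega) h]
    simp

theorem pvSplitOnMax_eq (l : List Char) : PySem.Chars.splitOnMax l pvSEP 1 = pvSpA1 l := by
  rcases h : pvSpA1 l with _ | ⟨p, ps⟩
  · cases l with
    | nil => simp [pvSpA1] at h
    | cons c rest =>
      rw [pvSpA1] at h
      revert h; split
      · simp
      · rcases h2 : pvSpA1 rest with _ | ⟨r, rs⟩ <;> simp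
  · unfold PySem.Chars.splitOnMax
    rw [if_neg (by omega : ¬ (1:Int) < 0)]
    rw [show ((1:Int).toNat) = 1 from rfl]
    rw [pvSplitOnMax_go_eq (l.length + 1) l [] [] p ps (by omega) h]
    simp

theorem pvNoSep_spA (l : List Char) (h : ¬ pvSEP <:+: l) : pvSpA l = [l] ∧ pvSpA1 l = [l] := by
  induction l with
  | nil => simp [pvSpA, pvSpA1]
  | cons c rest ih =>
    have hpre : ¬ pvSEP.isPrefixOf (c :: rest) = true := by
      intro hp
      exact h ((List.isPrefixOf_iff_prefix.mp hp).isInfix)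
    have hrest : ¬ pvSEP <:+: rest := fun h' => h (List.infix_cons_iff.mpr (Or.inr h'))
    obtain ⟨h1, h2⟩ := ih hrest
    constructor
    · rw [pvSpA, if_neg hpre, h1]
    · rw [pvSpA1, if_neg hpre, h2]

theorem pvSep_spA (l : List Char) (h : pvSEP <:+: l) :
    ∃ pre post, l = pre ++ pvSEP ++ post ∧ ¬ pvSEP <:+: pre ∧
      pvSpA1 l = [pre, post] ∧ pvSpA l = pre :: pvSpA post := by
  induction l with
  | nil =>
    exfalso
    have := List.eq_nil_of_infix_nil h
    simp [pvSEP] at this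
  | cons c rest ih =>
    by_cases hpre : pvSEP.isPrefixOf (c :: rest) = true
    · have hpfx : pvSEP <+: c :: rest := List.isPrefixOf_iff_prefix.mp hpre
      obtain ⟨t, ht⟩ := hpfx
      refine ⟨[], List.drop 3 (c :: rest), ?_, ?_, ?_, ?_⟩
      · rw [← ht]
        simp [pvSEP]
      · simp [pvSEP]
      · rw [pvSpA1, if_pos hpre]
      · rw [pvSpA, if_pos hpre]
    · have hrest : pvSEP <:+: rest := by
        rcases List.infix_cons_iff.mp h with hp | hi
        · exact absurd (List.isPrefixOf_iff_prefix.mpr hp) hpre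
        · exact hi
      obtain ⟨pre, post, heq, hnos, h1, h2⟩ := ih hrest
      refine ⟨c :: pre, post, by simp [heq], ?_, ?_, ?_⟩
      · intro h'
        rcases List.infix_cons_iff.mp h' with hp | hi
        · have hsub : c :: pre <+: c :: rest := by
            refine ⟨pvSEP ++ post, ?_⟩
            simp [heq]
          exact hpre (List.isPrefixOf_iff_prefix.mpr (hp.trans hsub))
        · exact hnos hi
      · rw [pvSpA1, if_neg hpre, h1]
      · rw [pvSpA, if_neg hpre, h2]

theorem pvSEP_toList : ("_x_" : String).toList = pvSEP := by decide

-- the leaf (no '_x_') branches of A compute exactly B's segment transform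
theorem pvLeaf_eq_segB (lag_k : Int) (fuel : Nat) (s : String)
    (hin : ¬ PySem.Str.isIn "_x_" s = true) :
    renameAGo lag_k (fuel + 1) s = segB lag_k s := by
  rw [renameAGo, if_neg hin, segB]

theorem pvMainA (lag_k : Int) (fuel : Nat) :
    ∀ s : String, s.toList.length < fuel →
      renameAGo lag_k fuel s =
        PySem.Str.join "_x_" ((pvSpA s.toList).map (fun cs => segB lag_k (String.ofList cs))) := by
  induction fuel with
  | zero => intro s h; omega
  | succ n ih =>
    intro s hlen
    by_cases hin : PySem.Str.isIn "_x_" s = true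
    · have hinf : pvSEP <:+: s.toList := by
        have := (PySem.Str.isIn_iff_infix "_x_" s).mp hin
        rwa [pvSEP_toList] at this
      obtain ⟨pre, post, heq, hnos, h1, h2⟩ := pvSep_spA s.toList hinf
      have hsplit : PySem.Str.splitMax? s "_x_" 1 =
          some [String.ofList pre, String.ofList post] := by
        rw [PySem.Str.splitMax?, pvSEP_toList, PySem.Chars.splitMax?,
            if_neg (by simp [pvSEP] : ¬ pvSEP.isEmpty = true), pvSplitOnMax_eq, h1]
        rfl
      rw [renameAGo, if_pos hin, hsplit]
      have hlenpre : (String.ofList pre).toList.length < n := by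
        have : s.toList.length = pre.length + 3 + post.length := by
          rw [heq]; simp [pvSEP]; omega
        simp only [String.toList_ofList]
        omega
      have hlenpost : (String.ofList post).toList.length < n := by
        have : s.toList.length = pre.length + 3 + post.length := by
          rw [heq]; simp [pvSEP]; omega
        simp only [String.toList_ofList]
        omega
      show renameAGo lag_k n (String.ofList pre) ++ "_x_" ++ renameAGo lag_k n (String.ofList post) = _
      rw [ih _ hlenpre, ih _ hlenpost]
      have hpreA : pvSpA (String.ofList pre).toList = [pre] := by
        rw [String.toList_ofList]; exact (pvNoSep_spA pre hnos).1
      rw [hpreA]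
      simp only [List.map_cons, List.map_nil, pvJoin_singleton]
      rw [h2]
      simp only [String.toList_ofList, List.map_cons]
      rcases hq : pvSpA post with _ | ⟨q, qs⟩
      · exact absurd hq (pvSpA_ne_nil _)
      · simp only [List.map_cons, pvJoin_cons_cons]
    · have hninf : ¬ pvSEP <:+: s.toList := by
        intro h'
        exact hin ((PySem.Str.isIn_iff_infix "_x_" s).mpr (by rwa [pvSEP_toList]))
      have hA : pvSpA s.toList = [s.toList] := (pvNoSep_spA s.toList hninf).1
      rw [hA]
      simp only [List.map_cons, List.map_nil, pvJoin_singleton, String.ofList_toList]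
      exact pvLeaf_eq_segB lag_k n s hin

-- ===== VERDICT (by name: the statement is the Claim_ definition above) =====
theorem rename_for_lag_py_spec : Claim_equal_rename_for_lag_py := by
  intro base_name lag_k _hdom
  unfold Spec_rename_for_lag_py rename_for_lag_py rename_for_lag_py_alt
  rw [pvMainA lag_k (base_name.toList.length + 1) base_name (by omega)]
  have hsplit : PySem.Str.split? base_name "_x_" =
      some ((pvSpA base_name.toList).map String.ofList) := by
    rw [PySem.Str.split?, pvSEP_toList, PySem.Chars.split?,
        if_neg (by simp [pvSEP] : ¬ pvSEP.isEmpty = true), pvSplitOn_eq]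
    rfl
  rw [hsplit]
  simp only [List.map_map, Function.comp_def]
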